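-- pv_equiv track=rewrite | github.com/zach-karlovich/modernbert-ner-ablation | scripts/sliding_window_conll.py | _max_exclusive_end
-- ===== SOURCE A (Python) =====
-- def _max_exclusive_end(prefix: list[int], w_start: int, budget: int) -> int:
--     n = len(prefix) - 1
--     lo, hi = w_start + 1, n
--     best = w_start
--     while lo <= hi:
--         mid = (lo + hi + 1) // 2
--         if prefix[mid] - prefix[w_start] <= budget:
--             best = mid
--             lo = mid + 1
--         else:
--             hi = mid - 1
--     return best if best > w_start else w_start + 1
-- ===== SOURCE B (Python) =====
-- def _max_exclusive_end(prefix: list[int], w_start: int, budget: int) -> int: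
--     # Bisection rewritten over an interval represented as (lo, width) with the
--     # midpoint computed as lo + width//2 — no hi bound, no (lo+hi+1)//2, and an
--     # Optional result combined on the way back instead of a `best` accumulator.
--     def go(lo: int, width: int):
--         if width == 0:
--             return None
--         mid = lo + width // 2
--         if prefix[mid] - prefix[w_start] <= budget:
--             r = go(mid + 1, width - width // 2 - 1)
--             return mid if r is None else r
--         return go(lo, width // 2)
--     r = go(w_start + 1, max(len(prefix) - 1 - w_start, 0))
--     return r if r is not None else w_start + 1
-- ===== Notes on version B (the rewrite author's own statement) =====
-- stated objective: alternative
-- what changed: The imperative while-loop over (lo, hi, best) with mid=(lo+hi+1)//2 is replaced by a pure recursion over the interval represented as (lo, width) with mid=lo+width//2, no upper bound and no best accumulator: it returns Optional[int] (the last admissible probe) and combines results on the way back; same probe sequence, so equal even on non-monotonic prefix arrays.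
import Mathlib
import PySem

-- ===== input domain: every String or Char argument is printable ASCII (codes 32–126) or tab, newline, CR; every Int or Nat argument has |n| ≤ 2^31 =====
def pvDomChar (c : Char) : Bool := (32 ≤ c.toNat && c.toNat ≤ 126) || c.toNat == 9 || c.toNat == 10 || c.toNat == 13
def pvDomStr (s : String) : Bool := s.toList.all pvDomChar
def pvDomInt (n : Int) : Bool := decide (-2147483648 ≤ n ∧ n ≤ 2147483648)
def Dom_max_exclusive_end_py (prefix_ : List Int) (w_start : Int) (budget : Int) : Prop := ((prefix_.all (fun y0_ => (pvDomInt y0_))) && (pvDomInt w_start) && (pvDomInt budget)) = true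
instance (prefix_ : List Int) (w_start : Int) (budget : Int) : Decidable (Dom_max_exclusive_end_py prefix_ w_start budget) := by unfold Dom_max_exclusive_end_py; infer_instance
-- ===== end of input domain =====

-- B reformulates the bisection over (lo, width : Nat) with mid = lo + width/2 (no hi bound,
-- no (lo+hi+1)//2, no fuel, no best accumulator: an Option result combined on the way back);
-- objective: alternative decomposition, same probe sequence and value.

-- ===== PORT A =====
-- A's while-loop, state (lo, hi, best); fuel is a totality guard only (enough for the whole
-- bisection), the fuel-0 branch returns the loop state exactly as the exhausted loop would.
def pvLoopA (prefix_ : List Int) (w_start : Int) (budget : Int) : Nat → Int → Int → Int → Int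
  | 0, _, _, best => best
  | fuel + 1, lo, hi, best =>
    if lo ≤ hi then
      if PySem.List.pyGetD prefix_ (PySem.Int.floordiv (lo + hi + 1) 2) 0 - PySem.List.pyGetD prefix_ w_start 0 ≤ budget then
        pvLoopA prefix_ w_start budget fuel (PySem.Int.floordiv (lo + hi + 1) 2 + 1) hi (PySem.Int.floordiv (lo + hi + 1) 2)
      else
        pvLoopA prefix_ w_start budget fuel lo (PySem.Int.floordiv (lo + hi + 1) 2 - 1) best
    else best

def max_exclusive_end_py (prefix_ : List Int) (w_start : Int) (budget : Int) : Int :=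
  if pvLoopA prefix_ w_start budget (((prefix_.length : Int) - 1 - w_start).toNat + 1) (w_start + 1) ((prefix_.length : Int) - 1) w_start > w_start then
    pvLoopA prefix_ w_start budget (((prefix_.length : Int) - 1 - w_start).toNat + 1) (w_start + 1) ((prefix_.length : Int) - 1) w_start
  else w_start + 1

-- ===== PORT B =====
-- B's recursion on the interval width (structural Nat measure, no fuel):
-- last admissible probe in [lo, lo+width-1], none if no probe succeeded.
def pvGoB (prefix_ : List Int) (w_start : Int) (budget : Int) (lo : Int) (width : Nat) : Option Int :=
  if width = 0 then none
  else
    if PySem.List.pyGetD prefix_ (lo + ((width / 2 : Nat) : Int)) 0 - PySem.List.pyGetD prefix_ w_start 0 ≤ budget then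
      match pvGoB prefix_ w_start budget (lo + ((width / 2 : Nat) : Int) + 1) (width - width / 2 - 1) with
      | none => some (lo + ((width / 2 : Nat) : Int))
      | some r => some r
    else pvGoB prefix_ w_start budget lo (width / 2)
termination_by width
decreasing_by all_goals omega

def max_exclusive_end_py_alt (prefix_ : List Int) (w_start : Int) (budget : Int) : Int :=
  match pvGoB prefix_ w_start budget (w_start + 1) (((prefix_.length : Int) - 1 - w_start).toNat) with
  | some r => r
  | none => w_start + 1

-- ===== PRECONDITION & SPEC =====
-- Pre_ excludes exactly the inputs on which Python A raises IndexError: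
-- w_start below -len(prefix) while the loop performs at least one subscript.
def Pre_max_exclusive_end_py (prefix_ : List Int) (w_start : Int) (budget : Int) : Prop :=
  -(prefix_.length : Int) ≤ w_start ∨ (prefix_.length : Int) - 1 ≤ w_start

instance (prefix_ : List Int) (w_start : Int) (budget : Int) : Decidable (Pre_max_exclusive_end_py prefix_ w_start budget) := by unfold Pre_max_exclusive_end_py; infer_instance

def pvWitness_max_exclusive_end_py : List Int × Int × Int := ([0, 2, 5, 7], 0, 5)

def Spec_max_exclusive_end_py (prefix_ : List Int) (w_start : Int) (budget : Int) (out : Int) : Prop := out = max_exclusive_end_py_alt prefix_ w_start budget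
instance (prefix_ : List Int) (w_start : Int) (budget : Int) (out : Int) : Decidable (Spec_max_exclusive_end_py prefix_ w_start budget out) := by unfold Spec_max_exclusive_end_py; infer_instance

-- ===== CLAIM (what is proved, stated in full; the proofs are below) =====
def Claim_equal_max_exclusive_end_py : Prop := ∀ (prefix_ : List Int) (w_start : Int) (budget : Int), Dom_max_exclusive_end_py prefix_ w_start budget → Pre_max_exclusive_end_py prefix_ w_start budget → Spec_max_exclusive_end_py prefix_ w_start budget (max_exclusive_end_py prefix_ w_start budget)

-- ===== LEMMAS AND PROOFS =====

-- A's midpoint (lo+hi+1)//2 on the interval [lo, lo+width-1] is lo + width/2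
theorem pvMidEq (lo : Int) (width : Nat) (hwpos : 1 ≤ width) :
    PySem.Int.floordiv (lo + (lo + (width : Int) - 1) + 1) 2 = lo + ((width / 2 : Nat) : Int) := by
  have h1 : lo + ((width / 2 : Nat) : Int) ≤ PySem.Int.floordiv (lo + (lo + (width : Int) - 1) + 1) 2 := by
    rw [PySem.Int.le_floordiv_iff_mul_le (by omega)]; omega
  have h2 : PySem.Int.floordiv (lo + (lo + (width : Int) - 1) + 1) 2 < lo + ((width / 2 : Nat) : Int) + 1 := by
    rw [PySem.Int.floordiv_lt_iff_lt_mul (by omega)]; omega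
  omega

-- the loop with accumulator `best` on [lo, lo+width-1] equals B's recursion with `best` default
theorem pvLoopA_eq_goB (prefix_ : List Int) (w_start budget : Int) :
    ∀ (width fuel : Nat) (lo best : Int), width < fuel →
      pvLoopA prefix_ w_start budget fuel lo (lo + (width : Int) - 1) best
        = (pvGoB prefix_ w_start budget lo width).getD best := by
  intro width
  induction width using Nat.strong_induction_on with
  | _ width ih =>
    intro fuel lo best hfuel
    obtain ⟨f, rfl⟩ : ∃ f, fuel = f + 1 := ⟨fuel - 1, by omega⟩
    rw [pvLoopA, pvGoB]
    by_cases hw : width = 0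
    · subst hw
      have hne : ¬ lo ≤ lo + ((0 : Nat) : Int) - 1 := by omega
      simp only [if_neg hne]
      simp
    · have hw1 : 1 ≤ width := by omega
      have hle : lo ≤ lo + (width : Int) - 1 := by omega
      simp only [if_neg hw, if_pos hle, pvMidEq lo width hw1]
      by_cases hc : PySem.List.pyGetD prefix_ (lo + ((width / 2 : Nat) : Int)) 0 - PySem.List.pyGetD prefix_ w_start 0 ≤ budget
      · simp only [if_pos hc]
        have hrw : lo + (width : Int) - 1
            = (lo + ((width / 2 : Nat) : Int) + 1) + ((width - width / 2 - 1 : Nat) : Int) - 1 := by omega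
        rw [hrw, ih (width - width / 2 - 1) (by omega) f _ _ (by omega)]
        cases pvGoB prefix_ w_start budget (lo + ((width / 2 : Nat) : Int) + 1) (width - width / 2 - 1) <;> simp
      · simp only [if_neg hc]
        have h' := ih (width / 2) (by omega) f lo best (by omega)
        calc pvLoopA prefix_ w_start budget f lo (lo + ((width / 2 : Nat) : Int) - 1) best
            = (pvGoB prefix_ w_start budget lo (width / 2)).getD best := h'
          _ = _ := rfl

-- any value B's recursion returns lies at or above lo
theorem pvGoB_ge (prefix_ : List Int) (w_start budget : Int) :
    ∀ (width : Nat) (lo r : Int),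
      pvGoB prefix_ w_start budget lo width = some r → lo ≤ r := by
  intro width
  induction width using Nat.strong_induction_on with
  | _ width ih =>
    intro lo r heq
    rw [pvGoB] at heq
    by_cases hw : width = 0
    · simp [hw] at heq
    · simp only [if_neg hw] at heq
      by_cases hc : PySem.List.pyGetD prefix_ (lo + ((width / 2 : Nat) : Int)) 0 - PySem.List.pyGetD prefix_ w_start 0 ≤ budget
      · simp only [if_pos hc] at heq
        cases hr : pvGoB prefix_ w_start budget (lo + ((width / 2 : Nat) : Int) + 1) (width - width / 2 - 1) with
        | none => rw [hr] at heq; simp at heq; omega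
        | some r' =>
          rw [hr] at heq; simp at heq
          have := ih (width - width / 2 - 1) (by omega) _ _ hr
          omega
      · simp only [if_neg hc] at heq
        have := ih (width / 2) (by omega) _ _ heq
        omega

-- ===== VERDICT (by name: the statement is the Claim_ definition above) =====
theorem max_exclusive_end_py_spec : Claim_equal_max_exclusive_end_py := by
  unfold Claim_equal_max_exclusive_end_py
  intro prefix_ w_start budget _ _
  unfold Spec_max_exclusive_end_py max_exclusive_end_py max_exclusive_end_py_alt
  by_cases hge : w_start ≤ (prefix_.length : Int) - 1
  · have hL : ∀ (hi : Int) (N : Nat), hi = (w_start + 1) + (N : Int) - 1 →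
        pvLoopA prefix_ w_start budget (N + 1) (w_start + 1) hi w_start
          = (pvGoB prefix_ w_start budget (w_start + 1) N).getD w_start := by
      intro hi N h
      rw [h]
      exact pvLoopA_eq_goB prefix_ w_start budget _ _ _ _ (by omega)
    rw [hL _ _ (by omega)]
    cases hr : pvGoB prefix_ w_start budget (w_start + 1) (((prefix_.length : Int) - 1 - w_start).toNat) with
    | none => simp
    | some r =>
      have := pvGoB_ge prefix_ w_start budget _ _ _ hr
      simp
      omega
  · have h0 : ((prefix_.length : Int) - 1 - w_start).toNat = 0 := by omega
    rw [h0, pvGoB, pvLoopA]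
    rw [if_neg (by omega : ¬ (w_start + 1 ≤ (prefix_.length : Int) - 1))]
    simp
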